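-- pv_equiv track=rewrite | github.com/RacleRay/MyLeetCodeLife | Book_part/Python_problems/Calculator/10-满足要求的第1500位置元素.py | find
-- ===== SOURCE A (Python) =====
-- def find(n):
--     elems = [0]
--     i = 1
--     while i <= 30:
--         if i % 2 == 0 or i % 3 == 0 or i % 5 == 0:
--             elems.append(i)
--         i += 1
--     nums = len(elems)
--     result = (n // 22) * 30 + elems[n % 22]  # 第n个数
--     return result
-- ===== SOURCE B (Python) =====
-- def find(n):
--     # rank(x) = index of x in the sorted infinite sequence of integers divisible
--     # by 2, 3 or 5 (index 0 at x = 0), by inclusion-exclusion on the multiples.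
--     def rank(x):
--         return x // 2 + x // 3 + x // 5 - x // 6 - x // 10 - x // 15 + x // 30
--
--     # binary search for the least x with rank(x) >= n; the answer lies within
--     # these bounds since consecutive elements of the sequence differ by at most 2.
--     lo = min(n, 2 * n) - 60
--     hi = max(n, 2 * n) + 60
--     while lo < hi:
--         mid = (lo + hi) // 2
--         if rank(mid) >= n:
--             hi = mid
--         else:
--             lo = mid + 1
--     return lo
-- ===== Notes on version B (the rewrite author's own statement) =====
-- stated objective: alternative
-- what changed: replaces A's precomputed residue table lookup with an inclusion-exclusion rank function (number of integers divisible by 2, 3 or 5 up to x) inverted by binary search for the least x whose rank reaches n; no table and no residue lookup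
import Mathlib
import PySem

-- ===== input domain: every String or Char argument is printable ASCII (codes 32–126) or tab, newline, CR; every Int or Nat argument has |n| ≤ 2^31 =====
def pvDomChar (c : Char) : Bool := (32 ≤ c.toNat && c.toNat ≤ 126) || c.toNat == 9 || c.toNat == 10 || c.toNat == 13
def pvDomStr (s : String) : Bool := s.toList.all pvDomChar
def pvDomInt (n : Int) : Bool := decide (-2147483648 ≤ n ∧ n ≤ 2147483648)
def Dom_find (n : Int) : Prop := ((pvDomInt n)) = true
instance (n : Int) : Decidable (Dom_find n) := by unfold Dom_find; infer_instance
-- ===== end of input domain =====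

-- B replaces A's residue table indexed by n % 22 with an inclusion-exclusion rank
-- function inverted by binary search; return values are identical.

-- ===== PORT A =====
-- the while loop building elems, as a fold over range(1, 31)
def find (n : Int) : Int :=
  let elems :=
    (PySem.List.pyRange 1 31 1).foldl
      (fun acc i =>
        if PySem.Int.mod i 2 = 0 ∨ PySem.Int.mod i 3 = 0 ∨ PySem.Int.mod i 5 = 0 then
          acc ++ [i]
        else acc)
      [0]
  -- elems[n % 22]: n % 22 ∈ [0, 22) and elems has 23 entries, so the index is
  -- always in range and Python never raises; the default is never used.
  PySem.Int.floordiv n 22 * 30 + (PySem.List.pyGet? elems (PySem.Int.mod n 22)).getD 0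

-- ===== PORT B =====
-- rank(x) of Source B: index of x in the sorted sequence of integers divisible by 2, 3 or 5
def rankDiv (x : Int) : Int :=
  PySem.Int.floordiv x 2 + PySem.Int.floordiv x 3 + PySem.Int.floordiv x 5
    - PySem.Int.floordiv x 6 - PySem.Int.floordiv x 10 - PySem.Int.floordiv x 15
    + PySem.Int.floordiv x 30

-- midpoint bounds, cited by bsearch's decreasing_by
theorem bsearchMid_bounds (lo hi : Int) (h : lo < hi) :
    lo ≤ PySem.Int.floordiv (lo + hi) 2 ∧ PySem.Int.floordiv (lo + hi) 2 < hi := by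
  rw [PySem.Int.floordiv_eq_ediv_of_pos (by norm_num)]
  omega

-- the while loop of Source B (mid = (lo+hi)//2 written inline in both branches)
def bsearch (n lo hi : Int) : Int :=
  if h : lo < hi then
    if rankDiv (PySem.Int.floordiv (lo + hi) 2) ≥ n then
      bsearch n lo (PySem.Int.floordiv (lo + hi) 2)
    else
      bsearch n (PySem.Int.floordiv (lo + hi) 2 + 1) hi
  else lo
termination_by (hi - lo).toNat
decreasing_by
  · have := bsearchMid_bounds lo hi h; omega
  · have := bsearchMid_bounds lo hi h; omega

def find_alt (n : Int) : Int :=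
  bsearch n (min n (2 * n) - 60) (max n (2 * n) + 60)

-- ===== PRECONDITION & SPEC =====
def Spec_find (n : Int) (out : Int) : Prop := out = find_alt n
instance (n : Int) (out : Int) : Decidable (Spec_find n out) := by unfold Spec_find; infer_instance

-- ===== CLAIM (what is proved, stated in full; the proofs are below) =====
def Claim_equal_find : Prop := ∀ (n : Int), Dom_find n → Spec_find n (find n)

-- ===== LEMMAS AND PROOFS =====

-- floordiv by the positive literals of rankDiv, as Lean's ediv (for omega)
theorem fd2 (a : Int) : PySem.Int.floordiv a 2 = a / 2 := PySem.Int.floordiv_eq_ediv_of_pos (by norm_num)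
theorem fd3 (a : Int) : PySem.Int.floordiv a 3 = a / 3 := PySem.Int.floordiv_eq_ediv_of_pos (by norm_num)
theorem fd5 (a : Int) : PySem.Int.floordiv a 5 = a / 5 := PySem.Int.floordiv_eq_ediv_of_pos (by norm_num)
theorem fd6 (a : Int) : PySem.Int.floordiv a 6 = a / 6 := PySem.Int.floordiv_eq_ediv_of_pos (by norm_num)
theorem fd10 (a : Int) : PySem.Int.floordiv a 10 = a / 10 := PySem.Int.floordiv_eq_ediv_of_pos (by norm_num)
theorem fd15 (a : Int) : PySem.Int.floordiv a 15 = a / 15 := PySem.Int.floordiv_eq_ediv_of_pos (by norm_num)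
theorem fd22 (a : Int) : PySem.Int.floordiv a 22 = a / 22 := PySem.Int.floordiv_eq_ediv_of_pos (by norm_num)
theorem fd30 (a : Int) : PySem.Int.floordiv a 30 = a / 30 := PySem.Int.floordiv_eq_ediv_of_pos (by norm_num)
theorem md22 (a : Int) : PySem.Int.mod a 22 = a % 22 := PySem.Int.mod_eq_emod_of_pos (by norm_num)


-- proof-only lookup table: the first 22 entries of A's elems list as a function
def tbl (r : Int) : Int :=
  if r = 0 then 0 else if r = 1 then 2 else if r = 2 then 3 else if r = 3 then 4 else if r = 4 then 5 else if r = 5 then 6 else if r = 6 then 8 else if r = 7 then 9 else if r = 8 then 10 else if r = 9 then 12 else if r = 10 then 14 else if r = 11 then 15 else if r = 12 then 16 else if r = 13 then 18 else if r = 14 then 20 else if r = 15 then 21 else if r = 16 then 22 else if r = 17 then 24 else if r = 18 then 25 else if r = 19 then 26 else if r = 20 then 27 else if r = 21 then 28 else 30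

theorem tbl_eq (r : Int) (h0 : 0 ≤ r) (h1 : r < 22) :
    (PySem.List.pyGet?
      [0, 2, 3, 4, 5, 6, 8, 9, 10, 12, 14, 15, 16, 18, 20, 21, 22, 24, 25, 26, 27, 28, 30]
      r).getD 0 = tbl r := by
  interval_cases r <;> decide

theorem rank_step (x : Int) : rankDiv x ≤ rankDiv (x + 1) := by
  simp only [rankDiv, fd2, fd3, fd5, fd6, fd10, fd15, fd30]
  obtain ⟨r, hr, hr0, hr30⟩ : ∃ r, x % 30 = r ∧ 0 ≤ r ∧ r < 30 := ⟨_, rfl, by omega, by omega⟩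
  interval_cases r <;> omega

theorem rank_mono {x y : Int} (h : x ≤ y) : rankDiv x ≤ rankDiv y := by
  refine Int.le_induction (le_refl _) (fun m _ ih => le_trans ih (rank_step m)) y h

-- binary search returns the unique a with rank(a) ≥ n and rank(a-1) < n, given bounds
theorem bsearch_correct (n a : Int) (h1 : n ≤ rankDiv a) (h2 : rankDiv (a - 1) < n) :
    ∀ k lo hi, (hi - lo).toNat ≤ k → lo ≤ a → a ≤ hi → bsearch n lo hi = a := by
  intro k
  induction k with
  | zero =>
    intro lo hi hk hlo hhi
    rw [bsearch, dif_neg (by omega : ¬ lo < hi)]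
    omega
  | succ k ih =>
    intro lo hi hk hlo hhi
    rw [bsearch]
    by_cases h : lo < hi
    · rw [dif_pos h]
      have hm := bsearchMid_bounds lo hi h
      by_cases hrk : rankDiv (PySem.Int.floordiv (lo + hi) 2) ≥ n
      · rw [if_pos hrk]
        refine ih lo _ (by omega) hlo ?_
        by_contra hc
        have := rank_mono (show PySem.Int.floordiv (lo + hi) 2 ≤ a - 1 by omega)
        omega
      · rw [if_neg hrk]
        refine ih _ hi (by omega) ?_ hhi
        by_contra hc
        have := rank_mono (show a ≤ PySem.Int.floordiv (lo + hi) 2 by omega)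
        omega
    · rw [dif_neg h]
      omega

-- ===== VERDICT (by name: the statement is the Claim_ definition above) =====
set_option maxHeartbeats 1600000 in
theorem find_spec : Claim_equal_find := by
  intro n _
  unfold Spec_find
  have hfind : find n = (n / 22) * 30 +
      (PySem.List.pyGet?
        [0, 2, 3, 4, 5, 6, 8, 9, 10, 12, 14, 15, 16, 18, 20, 21, 22, 24, 25, 26, 27, 28, 30]
        (n % 22)).getD 0 := by
    have helems :
        (PySem.List.pyRange 1 31 1).foldl
          (fun acc i =>
            if PySem.Int.mod i 2 = 0 ∨ PySem.Int.mod i 3 = 0 ∨ PySem.Int.mod i 5 = 0 then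
              acc ++ [i]
            else acc)
          [0]
        = [0, 2, 3, 4, 5, 6, 8, 9, 10, 12, 14, 15, 16, 18, 20, 21, 22, 24, 25, 26, 27, 28, 30] := by
      decide
    simp only [find, helems, fd22, md22]
  obtain ⟨q, r, hq, hr, hr0, hr22, hn⟩ :
      ∃ q r, n / 22 = q ∧ n % 22 = r ∧ 0 ≤ r ∧ r < 22 ∧ n = 22 * q + r :=
    ⟨n / 22, n % 22, rfl, rfl, by omega, by omega, by omega⟩
  rw [hfind, hq, hr, tbl_eq r hr0 hr22]
  unfold find_alt
  interval_cases r <;>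
    (norm_num [tbl]
     refine (bsearch_correct n _ ?_ ?_
       ((max n (2 * n) + 60) - (min n (2 * n) - 60)).toNat _ _ le_rfl ?_ ?_).symm <;>
       first
         | omega
         | (simp only [rankDiv, fd2, fd3, fd5, fd6, fd10, fd15, fd30]; omega))
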